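-- pv_equiv track=rewrite | github.com/envomp/2019-Logical-Programming | pr09_recursion/pr09_tests.py | my_task2
-- ===== SOURCE A (Python) =====
-- def my_task2(string):
--     if len(string) < 2:
--         return string
--     answer = string[0]
--     prev = string[0]
--     for c in string[1:]:
--         if prev == c:
--             answer += "-"
--         answer += c
--         prev = c
--     return answer
-- ===== SOURCE B (Python) =====
-- def my_task2(string):
--     runs = []
--     for c in string:
--         if runs and runs[-1][-1] == c:
--             runs[-1] += c
--         else:
--             runs.append(c)
--     return ''.join('-'.join(r) for r in runs)
-- ===== Notes on version B (the rewrite author's own statement) =====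
-- stated objective: alternative
-- what changed: Replaces A's single pass with an answer/prev accumulator pair by a run-grouping decomposition: first build the maximal runs of equal adjacent characters, then join each run's characters with a dash and concatenate the runs; it trades A's one fused loop for a build-runs-then-join pipeline with no prev variable and no length guard.
import Mathlib
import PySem

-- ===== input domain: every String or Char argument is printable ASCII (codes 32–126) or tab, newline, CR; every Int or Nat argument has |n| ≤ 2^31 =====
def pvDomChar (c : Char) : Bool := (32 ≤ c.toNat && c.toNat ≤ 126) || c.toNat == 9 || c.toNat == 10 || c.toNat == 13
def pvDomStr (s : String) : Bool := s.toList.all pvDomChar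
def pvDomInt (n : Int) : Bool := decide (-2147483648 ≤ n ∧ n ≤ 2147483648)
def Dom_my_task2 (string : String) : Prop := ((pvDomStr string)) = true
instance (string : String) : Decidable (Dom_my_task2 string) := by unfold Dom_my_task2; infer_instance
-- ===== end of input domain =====

-- B replaces A's single loop over characters with an answer/prev accumulator pair by a
-- run-grouping decomposition: build the maximal runs of equal characters, then join each
-- run with '-' and concatenate; objective: alternative decomposition, same cost.


-- ===== PORT A =====
-- Literal transliteration of A: the len<2 guard, then answer/prev initialised to
-- string[0] and the for-loop over string[1:] folded over the same (answer, prev) state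
-- (c0 = string[0], rest = string[1:], both exact here since len ≥ 2).
def my_task2 (string : String) : String :=
  if PySem.Str.len string < 2 then string
  else
    match string.toList with
    | [] => string  -- unreachable: len ≥ 2
    | c0 :: rest =>
      let st := rest.foldl (fun (st : List Char × Char) c =>
        let answer := st.1
        let prev := st.2
        let answer := if prev == c then answer ++ ['-'] else answer
        (answer ++ [c], c)) ([c0], c0)
      String.ofList st.1

-- ===== PORT B =====
-- Source B's loop body: extend the last run if its last character equals c, else open a new run
-- ('if runs and runs[-1][-1] == c: runs[-1] += c else: runs.append(c)').
def pvStep (runs : List (List Char)) (c : Char) : List (List Char) :=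
  match runs.getLast? with
  | some r => if r.getLast? == some c then runs.dropLast ++ [r ++ [c]] else runs ++ [[c]]
  | none => [[c]]

-- Literal transliteration of Source B: fold pvStep over the characters to build the runs,
-- then ''.join('-'.join(r) for r in runs)  ('-'.join r = List.intersperse '-' r).
def my_task2_alt (string : String) : String :=
  let runs := string.toList.foldl pvStep []
  String.ofList ((runs.map (List.intersperse '-')).flatten)

-- ===== PRECONDITION & SPEC =====
def Spec_my_task2 (string : String) (out : String) : Prop := out = my_task2_alt string
instance (string : String) (out : String) : Decidable (Spec_my_task2 string out) := by unfold Spec_my_task2; infer_instance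

-- ===== CLAIM (what is proved, stated in full; the proofs are below) =====
def Claim_equal_my_task2 : Prop := ∀ (string : String), Dom_my_task2 string → Spec_my_task2 string (my_task2 string)

-- ===== LEMMAS AND PROOFS =====

-- What A's loop appends after the initial character, as a function of prev and the remaining chars.
def pvBody : Char → List Char → List Char
  | _, [] => []
  | prev, c :: cs => (if prev == c then ['-'] else []) ++ c :: pvBody c cs

theorem pvFoldl_eq_body (rest : List Char) : ∀ (p : List Char × Char),
    (rest.foldl (fun (st : List Char × Char) c =>
      let answer := st.1
      let prev := st.2
      let answer := if prev == c then answer ++ ['-'] else answer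
      (answer ++ [c], c)) p).1 = p.1 ++ pvBody p.2 rest := by
  induction rest with
  | nil => intro p; simp [pvBody]
  | cons c cs ih =>
    intro p
    rw [List.foldl_cons, ih]
    by_cases h : p.2 == c <;> simp [pvBody, h, List.append_assoc]

theorem pvIntersperse_concat (c : Char) : ∀ (r : List Char),
    List.intersperse '-' (r ++ [c]) =
      if r = [] then [c] else List.intersperse '-' r ++ ['-', c]
  | [] => rfl
  | [_] => rfl
  | a :: b :: t => by
    have ih := pvIntersperse_concat c (b :: t)
    have h2 : List.intersperse '-' ((a :: b :: t) ++ [c])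
        = a :: '-' :: List.intersperse '-' ((b :: t) ++ [c]) := rfl
    rw [h2, ih]
    simp

theorem pvRuns_invariant (l : List Char) : ∀ (rs : List (List Char)) (r : List Char) (p : Char),
    (((l.foldl pvStep (rs ++ [r ++ [p]])).map (List.intersperse '-'))).flatten
      = (((rs ++ [r ++ [p]]).map (List.intersperse '-'))).flatten ++ pvBody p l := by
  induction l with
  | nil => intro rs r p; simp [pvBody]
  | cons c l ih =>
    intro rs r p
    rw [List.foldl_cons]
    have hstep : pvStep (rs ++ [r ++ [p]]) c =
        if p == c then rs ++ [(r ++ [p]) ++ [c]] else (rs ++ [r ++ [p]]) ++ [[c]] := by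
      simp [pvStep]
    by_cases h : p = c
    · subst h
      rw [hstep, if_pos (by simp)]
      rw [ih rs (r ++ [p]) p]
      simp only [List.map_append, List.flatten_append, List.map_cons, List.map_nil,
        List.flatten_cons, List.flatten_nil, List.append_nil]
      rw [pvIntersperse_concat p (r ++ [p]), if_neg (by simp)]
      simp [pvBody]
    · rw [hstep, if_neg (by simpa using h)]
      rw [show (rs ++ [r ++ [p]]) ++ [[c]] = (rs ++ [r ++ [p]]) ++ [[] ++ [c]] by simp]
      rw [ih (rs ++ [r ++ [p]]) [] c]
      simp only [List.map_append, List.flatten_append, List.map_cons, List.map_nil,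
        List.flatten_cons, List.flatten_nil, List.append_nil, List.nil_append]
      have hb : pvBody p (c :: l) = c :: pvBody c l := by
        simp [pvBody, h]
      rw [hb]
      simp [List.intersperse]
    
theorem my_task2_spec : Claim_equal_my_task2 := by
  intro string _
  unfold Spec_my_task2 my_task2 my_task2_alt
  have hs : String.ofList string.toList = string := String.ofList_toList
  rcases he : string.toList with _ | ⟨c0, rest⟩
  · have h : PySem.Str.len string < 2 := by simp [PySem.Str.len_eq, he]
    rw [if_pos h, ← hs, he]
    rfl
  · by_cases h : PySem.Str.len string < 2
    · have hr : rest = [] := by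
        have h2 := h
        rw [PySem.Str.len_eq, he] at h2
        simp at h2
        omega
      subst hr
      rw [if_pos h, ← hs, he]
      rfl
    · rw [if_neg h]
      show String.ofList (rest.foldl _ ([c0], c0)).1 = _
      rw [pvFoldl_eq_body]
      rw [List.foldl_cons, show pvStep [] c0 = [] ++ [[] ++ [c0]] from rfl]
      show String.ofList (([c0], c0).1 ++ pvBody ([c0], c0).2 rest)
          = String.ofList (List.map (List.intersperse '-')
              (List.foldl pvStep ([] ++ [[] ++ [c0]]) rest)).flatten
      rw [pvRuns_invariant rest [] [] c0]
      simp [List.intersperse]
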